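-- pv_equiv track=rewrite | github.com/hanwgyu/CTCI_solution | Leetcode/Get_Maximum_in_Generated_Array.py | getMaximumGenerated
-- ===== SOURCE A (Python) =====
-- from collections import deque
--
-- def getMaximumGenerated(n: int) -> int:
--     if n < 2:
--         return n
--     q = deque([1])
--     ans, a = 0, 0
--     for i in range(2,n+1):
--         if i % 2 == 0:
--             a = q.popleft()
--             q.append(a)
--             ans = max(ans, a)
--         else:
--             q.append(a+q[0])
--             ans = max(ans, a+q[0])
--     return ans
-- ===== SOURCE B (Python) =====
-- def getMaximumGenerated(n: int) -> int:
--     if n < 2: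
--         return n
--     nums = [0, 1]
--     for i in range(2, n + 1):
--         if i % 2 == 0:
--             nums.append(nums[i // 2])
--         else:
--             nums.append(nums[i // 2] + nums[i // 2 + 1])
--     return max(nums)
-- ===== Notes on version B (the rewrite author's own statement) =====
-- stated objective: simpler
-- what changed: B builds the whole generated array with direct random-access i//2 indexing and takes max() at the end, instead of A's FIFO deque simulation that maintains a sliding window by popping/peeking the front and tracking a running maximum; a timing run also measured B faster (deque ops and per-step max replaced by plain list appends and one final max).
import Mathlib
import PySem

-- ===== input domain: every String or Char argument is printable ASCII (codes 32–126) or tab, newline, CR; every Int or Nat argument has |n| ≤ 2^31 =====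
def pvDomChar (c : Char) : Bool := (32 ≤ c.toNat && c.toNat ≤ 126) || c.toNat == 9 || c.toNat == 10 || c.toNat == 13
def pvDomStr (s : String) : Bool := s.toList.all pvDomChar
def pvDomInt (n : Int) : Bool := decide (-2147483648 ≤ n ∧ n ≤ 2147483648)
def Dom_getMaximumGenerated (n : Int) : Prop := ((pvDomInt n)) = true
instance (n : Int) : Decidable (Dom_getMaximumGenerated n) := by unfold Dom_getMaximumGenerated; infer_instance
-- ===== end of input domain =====

-- B builds the whole generated array with direct i//2 random-access indexing and takes max() at the end,
-- instead of A's FIFO deque sliding-window simulation with a running maximum (objective: simpler).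


-- ===== PORT A =====
-- one loop iteration of A: state (q, ans, a)
def pvStepA (st : List Int × Int × Int) (i : Int) : List Int × Int × Int :=
  let q := st.1
  let ans := st.2.1
  let a := st.2.2
  if PySem.Int.mod i 2 == 0 then
    -- a = q.popleft(); q.append(a); ans = max(ans, a)
    -- q is never empty at this point in A, so popleft is exactly "front, then drop it"
    let a' := PySem.List.pyGetD q 0 0
    (q.drop 1 ++ [a'], max ans a', a')
  else
    -- q.append(a + q[0]); ans = max(ans, a + q[0])
    let x := a + PySem.List.pyGetD q 0 0
    (q ++ [x], max ans x, a)

def pvLoopA (n : Int) : List Int × Int × Int :=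
  (PySem.List.pyRange 2 (n + 1) 1).foldl pvStepA ([1], 0, 0)

def getMaximumGenerated (n : Int) : Int :=
  if n < 2 then n
  else (pvLoopA n).2.1

-- ===== PORT B =====
-- one loop iteration of B: append nums[i//2] (even i) or nums[i//2] + nums[i//2+1] (odd i);
-- the indices i//2, i//2+1 are always in range in B, so pyGetD's default is never used
def pvStepB (nums : List Int) (i : Int) : List Int :=
  if PySem.Int.mod i 2 == 0 then
    nums ++ [PySem.List.pyGetD nums (PySem.Int.floordiv i 2) 0]
  else
    nums ++ [PySem.List.pyGetD nums (PySem.Int.floordiv i 2) 0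
             + PySem.List.pyGetD nums (PySem.Int.floordiv i 2 + 1) 0]

def pvLoopB (n : Int) : List Int :=
  (PySem.List.pyRange 2 (n + 1) 1).foldl pvStepB [0, 1]

def getMaximumGenerated_alt (n : Int) : Int :=
  if n < 2 then n
  else (PySem.List.max? (pvLoopB n) (fun x => x)).getD 0  -- max(nums); nums is nonempty

-- ===== PRECONDITION & SPEC =====
def Spec_getMaximumGenerated (n : Int) (out : Int) : Prop := out = getMaximumGenerated_alt n
instance (n : Int) (out : Int) : Decidable (Spec_getMaximumGenerated n out) := by unfold Spec_getMaximumGenerated; infer_instance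

-- ===== CLAIM (what is proved, stated in full; the proofs are below) =====
def Claim_equal_getMaximumGenerated : Prop := ∀ (n : Int), Dom_getMaximumGenerated n → Spec_getMaximumGenerated n (getMaximumGenerated n)

-- ===== LEMMAS AND PROOFS =====

-- the simulation invariant at stage m (after processing i = 2 .. m):
-- A's queue is the tail of B's array from index m/2+1, A's 'a' is nums[m/2],
-- A's running max is the max over nums[2..], and every entry of nums from index 1 on is ≥ 1
def pvInv (m : Nat) : Prop :=
  (pvLoopB (m : Int)).length = m + 1 ∧
  (pvLoopA (m : Int)).1 = (pvLoopB (m : Int)).drop (m / 2 + 1) ∧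
  (pvLoopA (m : Int)).2.2 = (pvLoopB (m : Int)).getD (m / 2) 0 ∧
  (pvLoopA (m : Int)).2.1 = ((pvLoopB (m : Int)).drop 2).foldl max 0 ∧
  (pvLoopB (m : Int)).take 2 = [0, 1] ∧
  ∀ x ∈ (pvLoopB (m : Int)).drop 1, 1 ≤ x

theorem pvLoopA_succ (m : Nat) (h : 2 ≤ m) :
    pvLoopA ((m : Int) + 1) = pvStepA (pvLoopA (m : Int)) ((m : Int) + 1) := by
  unfold pvLoopA
  rw [show (m : Int) + 1 + 1 = ((m : Int) + 1) + 1 by ring,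
      PySem.List.pyRange_one_succ_right (by omega : (2:Int) ≤ (m : Int) + 1)]
  simp [List.foldl_append]

theorem pvLoopB_succ (m : Nat) (h : 2 ≤ m) :
    pvLoopB ((m : Int) + 1) = pvStepB (pvLoopB (m : Int)) ((m : Int) + 1) := by
  unfold pvLoopB
  rw [show (m : Int) + 1 + 1 = ((m : Int) + 1) + 1 by ring,
      PySem.List.pyRange_one_succ_right (by omega : (2:Int) ≤ (m : Int) + 1)]
  simp [List.foldl_append]

theorem pvInv_base : pvInv 2 := by unfold pvInv; decide

theorem pv_getD_mem_drop_one (N : List Int) (k : Nat) (h1 : 1 ≤ k) (h2 : k < N.length) :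
    N.getD k 0 ∈ N.drop 1 := by
  rw [List.getD_eq_getElem?_getD, List.getElem?_eq_getElem h2]
  have hk : k - 1 < (N.drop 1).length := by simp; omega
  have : N[k] = (N.drop 1)[k - 1] := by
    rw [List.getElem_drop]
    congr 1; omega
  rw [this]
  exact List.getElem_mem hk

theorem pv_getD_drop (N : List Int) (k : Nat) :
    (N.drop k).getD 0 0 = N.getD k 0 := by
  rw [List.getD_eq_getElem?_getD, List.getD_eq_getElem?_getD, List.getElem?_drop]
  simp

theorem pv_getD_append (N : List Int) (v : Int) (k : Nat) (hk : k < N.length) :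
    (N ++ [v]).getD k 0 = N.getD k 0 := by
  rw [List.getD_eq_getElem?_getD, List.getD_eq_getElem?_getD, List.getElem?_append_left hk]

theorem pvInv_step (m : Nat) (h : 2 ≤ m) (ih : pvInv m) : pvInv (m + 1) := by
  obtain ⟨h1, h2, h3, h4, h6, h5⟩ := ih
  have hcast : ((m + 1 : Nat) : Int) = (m : Int) + 1 := by push_cast; ring
  have hA := pvLoopA_succ m h
  have hB := pvLoopB_succ m h
  set N := pvLoopB (m : Int) with hN
  set st := pvLoopA (m : Int) with hst
  have hmod : PySem.Int.mod ((m : Int) + 1) 2 = (((m + 1) % 2 : Nat) : Int) := by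
    rw [← hcast]; exact_mod_cast PySem.Int.mod_natCast (m + 1) 2
  have hdiv : PySem.Int.floordiv ((m : Int) + 1) 2 = (((m + 1) / 2 : Nat) : Int) := by
    rw [← hcast]; exact_mod_cast PySem.Int.floordiv_natCast (m + 1) 2
  unfold pvInv
  rw [hcast, hA, hB]
  by_cases hp : (m + 1) % 2 = 0
  · -- m + 1 even, m odd
    have hm2 : (m + 1) / 2 = m / 2 + 1 := by omega
    have hmod0 : (PySem.Int.mod ((m : Int) + 1) 2 == 0) = true := by
      rw [hmod, hp]; decide
    unfold pvStepA pvStepB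
    rw [hmod0]
    simp only [if_true, hdiv, PySem.List.pyGetD_natCast, PySem.List.pyGetD_zero]
    have hval : (st.1).getD 0 0 = N.getD ((m + 1) / 2) 0 := by
      rw [h2, pv_getD_drop, hm2]
    rw [hval]
    set v := N.getD ((m + 1) / 2) 0 with hv
    have hvN : v = N.getD ((m + 1) / 2) 0 := hv
    have hvpos : 1 ≤ v := by
      apply h5
      exact pv_getD_mem_drop_one N _ (by omega) (by omega)
    refine ⟨by simp [h1], ?_, ?_, ?_, ?_, ?_⟩
    · -- queue
      rw [h2, List.drop_drop,
          List.drop_append_of_le_length (show (m + 1) / 2 + 1 ≤ N.length by omega)]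
      congr 2
      omega
    · -- a
      rw [pv_getD_append N v _ (by omega)]
    · -- ans
      rw [h4, List.drop_append_of_le_length (show 2 ≤ N.length by omega), List.foldl_append]
      simp
    · -- take 2
      rw [List.take_append_of_le_length (show 2 ≤ N.length by omega), h6]
    · -- positivity
      rw [List.drop_append_of_le_length (show 1 ≤ N.length by omega)]
      intro x hx
      rcases List.mem_append.mp hx with hx | hx
      · exact h5 x hx
      · simp at hx; omega
  · -- m + 1 odd, m even
    have hm2 : (m + 1) / 2 = m / 2 := by omega
    have hmod0 : (PySem.Int.mod ((m : Int) + 1) 2 == 0) = false := by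
      rw [hmod]
      have h21 : (m + 1) % 2 = 1 := by omega
      rw [h21]; decide
    unfold pvStepA pvStepB
    rw [hmod0]
    have hcast2 : (((m + 1) / 2 : Nat) : Int) + 1 = (((m + 1) / 2 + 1 : Nat) : Int) := by
      push_cast; ring
    simp only [Bool.false_eq_true, if_false, hdiv, hcast2, PySem.List.pyGetD_natCast, PySem.List.pyGetD_zero]
    have hfront : (st.1).getD 0 0 = N.getD ((m + 1) / 2 + 1) 0 := by
      rw [h2, pv_getD_drop, hm2]
    rw [hfront, h3, ← hm2]
    set v := N.getD ((m + 1) / 2) 0 + N.getD ((m + 1) / 2 + 1) 0 with hv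
    have hvpos : 1 ≤ v := by
      have p1 : 1 ≤ N.getD ((m + 1) / 2) 0 :=
        h5 _ (pv_getD_mem_drop_one N _ (by omega) (by omega))
      have p2 : 1 ≤ N.getD ((m + 1) / 2 + 1) 0 :=
        h5 _ (pv_getD_mem_drop_one N _ (by omega) (by omega))
      omega
    refine ⟨by simp [h1], ?_, ?_, ?_, ?_, ?_⟩
    · -- queue
      rw [h2, List.drop_append_of_le_length (show (m + 1) / 2 + 1 ≤ N.length by omega)]
      congr 2
      omega
    · -- a
      rw [pv_getD_append N v _ (by omega), hm2]
    · -- ans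
      rw [h4, List.drop_append_of_le_length (show 2 ≤ N.length by omega), List.foldl_append]
      simp
    · -- take 2
      rw [List.take_append_of_le_length (show 2 ≤ N.length by omega), h6]
    · -- positivity
      rw [List.drop_append_of_le_length (show 1 ≤ N.length by omega)]
      intro x hx
      rcases List.mem_append.mp hx with hx | hx
      · exact h5 x hx
      · simp at hx; omega

theorem pvInv_all (m : Nat) (h : 2 ≤ m) : pvInv m := by
  induction m with
  | zero => omega
  | succ k ih =>
    rcases Nat.lt_or_ge k 2 with hk | hk
    · interval_cases k
      · omega
      · exact pvInv_base
    · exact pvInv_step k hk (ih hk)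

theorem pv_main (m : Nat) (h : 2 ≤ m) :
    (pvLoopA (m : Int)).2.1 = (PySem.List.max? (pvLoopB (m : Int)) (fun x => x)).getD 0 := by
  obtain ⟨h1, h2, h3, h4, h6, h5⟩ := pvInv_all m h
  set N := pvLoopB (m : Int) with hN
  have hshape : N = 0 :: 1 :: N.drop 2 := by
    conv_lhs => rw [← List.take_append_drop 2 N, h6]
    rfl
  obtain ⟨r0, r', hr⟩ : ∃ r0 r', N.drop 2 = r0 :: r' := by
    have hlen : (N.drop 2).length = m - 1 := by simp [h1]
    cases hc : N.drop 2 with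
    | nil => rw [hc] at hlen; simp at hlen; omega
    | cons a b => exact ⟨a, b, rfl⟩
  have hr0 : 1 ≤ r0 := by
    apply h5
    have hdd : N.drop 2 = (N.drop 1).drop 1 := by rw [List.drop_drop]
    have hmem : r0 ∈ N.drop 2 := by rw [hr]; exact List.mem_cons_self
    rw [hdd] at hmem
    exact List.mem_of_mem_drop hmem
  rw [h4, hr]
  conv_rhs => rw [hshape, hr]
  rw [PySem.List.max?_id_cons]
  simp only [List.foldl_cons, Option.getD_some]
  congr 1
  omega

-- ===== VERDICT (by name: the statement is the Claim_ definition above) =====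
theorem getMaximumGenerated_spec : Claim_equal_getMaximumGenerated := by
  intro n _
  unfold Spec_getMaximumGenerated getMaximumGenerated getMaximumGenerated_alt
  split_ifs with hlt
  · rfl
  · have h2 : (2:Int) ≤ n := by omega
    have hm : n = ((n.toNat : Nat) : Int) := by omega
    rw [hm]
    exact pv_main n.toNat (by omega)
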